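-- pv_equiv track=rewrite | github.com/pranav-2398/Leetcode_Practice | Problems/Heaps/Medium/3016 - Min pushes to type Word II.py | minimumPushes
-- ===== SOURCE A (Python) =====
-- from collections import Counter
-- import heapq
--
-- def minimumPushes(word: str) -> int:
--     countword = Counter(word)
--     heap = [-v for k, v in countword.items()]
--     heapq.heapify(heap)
--
--     letters = 8
--     i = 1
--     res = 0
--     while heap:
--         value = heapq.heappop(heap)
--         res += i * (-value)
--         letters -= 1
--         if not letters:
--             i += 1
--             letters = 8
--     return res
-- ===== SOURCE B (Python) =====
-- from collections import Counter
--
-- def minimumPushes(word: str) -> int: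
--     # layered sums: each layer adds the total of the remaining counts and
--     # discards the 8 largest; a count surviving t layers is added t times,
--     # which is exactly its key's press multiplier.
--     counts = sorted(Counter(word).values())
--     res = 0
--     while counts:
--         res += sum(counts)
--         counts = counts[:-8]
--     return res
-- ===== Notes on version B (the rewrite author's own statement) =====
-- stated objective: alternative
-- what changed: Replaces the heap and the stateful letters/i multiplier loop with layered suffix sums: sort the counts ascending once, then repeatedly add the running total and slice off the 8 largest, so no per-element multiplier and no countdown state exist at all.
import Mathlib
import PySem

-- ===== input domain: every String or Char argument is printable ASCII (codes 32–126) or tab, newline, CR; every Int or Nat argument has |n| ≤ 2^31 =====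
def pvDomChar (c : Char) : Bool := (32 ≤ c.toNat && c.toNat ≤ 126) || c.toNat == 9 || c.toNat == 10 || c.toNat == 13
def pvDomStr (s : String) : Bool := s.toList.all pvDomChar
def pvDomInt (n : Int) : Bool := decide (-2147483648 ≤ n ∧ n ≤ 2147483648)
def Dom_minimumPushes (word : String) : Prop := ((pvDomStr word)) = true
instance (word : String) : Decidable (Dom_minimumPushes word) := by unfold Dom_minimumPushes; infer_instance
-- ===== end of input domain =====

-- B replaces the heap and the stateful letters/i multiplier loop with layered suffix
-- sums over the ascending-sorted counts (objective: alternative decomposition).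

-- ===== PORT A =====
-- heapq has no PySem primitive; heapify + the heappop loop are ported semantically:
-- heappop returns the minimum of the Int heap and removes one occurrence of it, which is
-- exact for this program because equal heap elements are indistinguishable Int values,
-- so the popped VALUE sequence of Python's binary heap is exactly "smallest value first".
def pvHeapLoop (heap : List Int) (letters i res : Int) : Int :=
  match hmin : PySem.List.min? heap (fun x => x) with
  | none => res
  | some value =>
    let heap' := (PySem.List.remove? heap value).getD []
    let res' := res + i * (-value)
    let letters' := letters - 1
    if letters' = 0 then pvHeapLoop heap' 8 (i + 1) res'
    else pvHeapLoop heap' letters' i res'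
termination_by heap.length
decreasing_by
  all_goals
    simp only [PySem.List.remove?_eq_some_erase heap value (PySem.List.min?_mem hmin),
      Option.getD_some]
    have hv := PySem.List.min?_mem hmin
    rw [List.length_erase_of_mem hv]
    have := List.length_pos_of_mem hv
    omega

def minimumPushes (word : String) : Int :=
  let countword := PySem.Dict.counter word.toList
  let heap := countword.items.map (fun kv => -kv.2)
  pvHeapLoop heap 8 1 0

-- ===== PORT B =====
-- the 'while counts: res += sum(counts); counts = counts[:-8]' loop of Source B
def pvLayerLoop (counts : List Int) (res : Int) : Int :=
  if counts = [] then res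
  else pvLayerLoop (PySem.List.slice counts none (some (-8))) (res + counts.sum)
termination_by counts.length
decreasing_by
  rw [PySem.List.slice_to_neg_ofNat counts 8 (by omega)]
  have : counts.length ≠ 0 := by simpa [List.length_eq_zero_iff] using ‹¬ counts = []›
  simp only [List.length_take]
  omega

def minimumPushes_alt (word : String) : Int :=
  let counts := PySem.List.sorted (PySem.Dict.counter word.toList).values (fun x => x) false
  pvLayerLoop counts 0

-- ===== PRECONDITION & SPEC =====
def Spec_minimumPushes (word : String) (out : Int) : Prop := out = minimumPushes_alt word
instance (word : String) (out : Int) : Decidable (Spec_minimumPushes word out) := by unfold Spec_minimumPushes; infer_instance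

-- ===== CLAIM (what is proved, stated in full; the proofs are below) =====
def Claim_equal_minimumPushes : Prop := ∀ (word : String), Dom_minimumPushes word → Spec_minimumPushes word (minimumPushes word)

-- ===== LEMMAS AND PROOFS =====

-- weighted sum of xs where position j (global index) has weight (j / 8 + 1), value negated
def pvWeightSum (xs : List Int) (j : Nat) : Int :=
  match xs with
  | [] => 0
  | v :: t => ((j / 8 : Nat) + 1) * (-v) + pvWeightSum t (j + 1)

-- same weighted sum without the negation (the B-side bridge form)
def pvW (xs : List Int) (j : Nat) : Int :=
  match xs with
  | [] => 0
  | v :: t => ((j / 8 : Nat) + 1) * v + pvW t (j + 1)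

-- popping the minimum peels the head of the ascending sort
theorem pvSorted_head (xs : List Int) (v : Int)
    (h : PySem.List.min? xs (fun x => x) = some v) :
    PySem.List.sorted xs (fun x => x) false = v :: PySem.List.sorted (xs.erase v) (fun x => x) false := by
  have hv : v ∈ xs := PySem.List.min?_mem h
  refine PySem.List.sorted_id_eq_of_perm_of_pairwise _ _ ?_ ?_
  · exact ((PySem.List.sorted_perm _ _ _).cons v).trans (List.perm_cons_erase hv).symm
  · refine List.Pairwise.cons ?_ (by simpa using PySem.List.sorted_pairwise (xs.erase v) (fun x => x))
    intro b hb
    exact PySem.List.min?_isMin h b (List.mem_of_mem_erase ((PySem.List.mem_sorted _ _ _ _).1 hb))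

theorem pvHeapLoop_eq (n : Nat) (heap : List Int) (j : Nat) (res : Int)
    (hn : heap.length ≤ n) :
    pvHeapLoop heap (8 - ((j % 8 : Nat) : Int)) (((j / 8 : Nat) : Int) + 1) res
      = res + pvWeightSum (PySem.List.sorted heap (fun x => x) false) j := by
  induction n generalizing heap j res with
  | zero =>
    have : heap = [] := List.length_eq_zero_iff.mp (Nat.le_zero.mp hn)
    subst this
    rw [pvHeapLoop]
    simp [PySem.List.min?, pvWeightSum, PySem.List.sorted]
  | succ n ih =>
    rw [pvHeapLoop]
    cases hmin : PySem.List.min? heap (fun x => x) with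
    | none =>
      have : heap = [] := (PySem.List.min?_eq_none_iff _ _).mp hmin
      subst this
      simp [pvWeightSum, PySem.List.sorted]
    | some v =>
      have hv : v ∈ heap := PySem.List.min?_mem hmin
      have herase : (PySem.List.remove? heap v).getD [] = heap.erase v := by
        rw [PySem.List.remove?_eq_some_erase heap v hv, Option.getD_some]
      have hlen : (heap.erase v).length ≤ n := by
        rw [List.length_erase_of_mem hv]
        have := List.length_pos_of_mem hv
        omega
      rw [pvSorted_head heap v hmin]
      simp only [herase, pvWeightSum]
      by_cases h7 : j % 8 = 7
      · have hl : (8 : Int) - ((j % 8 : Nat) : Int) - 1 = 0 := by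
          rw [h7]; norm_num
        rw [if_pos hl]
        have h1 : ((j / 8 : Nat) : Int) + 1 + 1 = (((j + 1) / 8 : Nat) : Int) + 1 := by
          have : (j + 1) / 8 = j / 8 + 1 := by omega
          rw [this]; push_cast; ring
        have h2 : (8 : Int) = 8 - (((j + 1) % 8 : Nat) : Int) := by
          have : (j + 1) % 8 = 0 := by omega
          rw [this]; norm_num
        rw [h1, h2, ih (heap.erase v) (j + 1) _ hlen]
        push_cast
        ring
      · have hl : ¬ ((8 : Int) - ((j % 8 : Nat) : Int) - 1 = 0) := by
          have := Nat.mod_lt j (y := 8) (by omega)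
          omega
        rw [if_neg hl]
        have h1 : (8 : Int) - ((j % 8 : Nat) : Int) - 1 = 8 - (((j + 1) % 8 : Nat) : Int) := by
          have hlt : j % 8 < 7 := by
            have := Nat.mod_lt j (y := 8) (by omega); omega
          have : (j + 1) % 8 = j % 8 + 1 := by omega
          rw [this]; push_cast; ring
        have h2 : ((j / 8 : Nat) : Int) = (((j + 1) / 8 : Nat) : Int) := by
          have : (j + 1) / 8 = j / 8 := by omega
          rw [this]
        rw [h1, h2, ih (heap.erase v) (j + 1) _ hlen]
        push_cast
        ring

-- ascending sort of the negations = negation of the descending sort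
theorem pvSorted_neg (xs : List Int) :
    PySem.List.sorted (xs.map (fun v => -v)) (fun x => x) false
      = (PySem.List.sorted xs (fun x => x) true).map (fun v => -v) := by
  refine PySem.List.sorted_id_eq_of_perm_of_pairwise _ _ ?_ ?_
  · exact (PySem.List.sorted_perm xs (fun x => x) true).map _
  · have := PySem.List.sorted_pairwise_rev xs (fun x => x)
    exact this.map _ (by intro a b h; simpa using h)

-- the descending sort is the reverse of the ascending sort (Int values: duplicates indistinguishable)
theorem pvSorted_rev_eq_reverse (xs : List Int) :
    PySem.List.sorted xs (fun x => x) true = (PySem.List.sorted xs (fun x => x) false).reverse := by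
  have h : (PySem.List.sorted xs (fun x => x) true).reverse
      = PySem.List.sorted xs (fun x => x) false := by
    refine PySem.List.eq_of_perm_of_pairwise_le_of_injective (fun x => x) (fun _ _ h => h) ?_ ?_ ?_
    · exact (List.reverse_perm _).trans
        ((PySem.List.sorted_perm xs _ true).trans (PySem.List.sorted_perm xs _ false).symm)
    · exact (List.pairwise_reverse).2
        (by simpa using PySem.List.sorted_pairwise_rev xs (fun x => x))
    · simpa using PySem.List.sorted_pairwise xs (fun x => x)
  rw [← h, List.reverse_reverse]

theorem pvWeightSum_neg (xs : List Int) (j : Nat) :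
    pvWeightSum (xs.map (fun v => -v)) j = pvW xs j := by
  induction xs generalizing j with
  | nil => simp [pvWeightSum, pvW]
  | cons v t ih => rw [List.map_cons, pvWeightSum, pvW, ih]; ring

theorem pvW_append (a b : List Int) (j : Nat) :
    pvW (a ++ b) j = pvW a j + pvW b (j + a.length) := by
  induction a generalizing j with
  | nil => simp [pvW]
  | cons v t ih =>
    rw [List.cons_append, pvW, pvW, ih (j + 1)]
    simp only [List.length_cons]
    ring_nf

theorem pvW_small (xs : List Int) (j : Nat) (h : j + xs.length ≤ 8) :
    pvW xs j = xs.sum := by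
  induction xs generalizing j with
  | nil => simp [pvW]
  | cons v t ih =>
    rw [pvW, ih (j + 1) (by simp at h ⊢; omega)]
    have : j / 8 = 0 := by simp at h; omega
    rw [this]
    simp

theorem pvW_shift8 (xs : List Int) (j : Nat) :
    pvW xs (j + 8) = xs.sum + pvW xs j := by
  induction xs generalizing j with
  | nil => simp [pvW]
  | cons v t ih =>
    rw [pvW, pvW]
    have harg : j + 8 + 1 = (j + 1) + 8 := by omega
    rw [harg, ih (j + 1)]
    have : (j + 8) / 8 = j / 8 + 1 := by omega
    rw [this]
    push_cast
    simp only [List.sum_cons]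
    ring

theorem pvW_drop8 (xs : List Int) :
    pvW xs 0 = xs.sum + pvW (xs.drop 8) 0 := by
  by_cases h : xs.length ≤ 8
  · rw [List.drop_eq_nil_of_le (by omega)]
    rw [pvW_small xs 0 (by omega)]
    simp [pvW]
  · conv_lhs => rw [← List.take_append_drop 8 xs]
    rw [pvW_append]
    have hlen : (xs.take 8).length = 8 := by simp; omega
    rw [hlen, pvW_small (xs.take 8) 0 (by omega)]
    rw [pvW_shift8 (xs.drop 8) 0]
    have hsum : (xs.take 8).sum + (xs.drop 8).sum = xs.sum := by
      rw [← List.sum_append, List.take_append_drop]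
    omega

theorem pvLayerLoop_eq (n : Nat) (ys : List Int) (res : Int) (hn : ys.length ≤ n) :
    pvLayerLoop ys res = res + pvW ys.reverse 0 := by
  induction n generalizing ys res with
  | zero =>
    have : ys = [] := List.length_eq_zero_iff.mp (Nat.le_zero.mp hn)
    subst this
    rw [pvLayerLoop]
    simp [pvW]
  | succ n ih =>
    rw [pvLayerLoop]
    by_cases h : ys = []
    · subst h; simp [pvW]
    · rw [if_neg h, PySem.List.slice_to_neg_ofNat ys 8 (by omega)]
      have hne : ys.length ≠ 0 := by simpa [List.length_eq_zero_iff] using h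
      have hlen : (ys.take (ys.length - 8)).length ≤ n := by
        simp only [List.length_take]; omega
      rw [ih _ _ hlen]
      have hdrop : (ys.take (ys.length - 8)).reverse = ys.reverse.drop 8 := by
        rw [List.drop_reverse]
      rw [hdrop]
      have := pvW_drop8 ys.reverse
      rw [List.sum_reverse_int] at this
      omega

-- ===== VERDICT (by name: the statement is the Claim_ definition above) =====
theorem minimumPushes_spec : Claim_equal_minimumPushes := by
  intro word _
  show minimumPushes word = minimumPushes_alt word
  simp only [minimumPushes, minimumPushes_alt]
  have hvals : (PySem.Dict.counter word.toList).items.map (fun kv => -kv.2)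
      = (PySem.Dict.counter word.toList).values.map (fun v => -v) := by
    simp [PySem.Dict.values, List.map_map, Function.comp]
  rw [hvals]
  set vals := (PySem.Dict.counter word.toList).values with hv
  have hA := pvHeapLoop_eq (vals.map (fun v => -v)).length (vals.map (fun v => -v)) 0 0 le_rfl
  norm_num at hA
  rw [hA, pvSorted_neg, pvWeightSum_neg, pvSorted_rev_eq_reverse]
  have hB := pvLayerLoop_eq (PySem.List.sorted vals (fun x => x) false).length
      (PySem.List.sorted vals (fun x => x) false) 0 le_rfl
  rw [hB]
  omega
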